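-- pv_equiv track=rewrite | github.com/Canna03/Competitive-Programming | CP/CCC/CCC '10/CCC '10 J1 - What is n, Daddy.py | solve
-- ===== SOURCE A (Python) =====
-- def solve(n: int) -> int:
--     a = max(0, n - 5)
--     n = min(5, n)
--     total = 1
--     while a + 1 < n:
--         n -= 1
--         a += 1
--         total += 1
--     return total
-- ===== SOURCE B (Python) =====
-- def solve(n: int) -> int:
--     g = min(5, n) - max(0, n - 5)
--     return 1 + max(0, g // 2)
-- ===== Notes on version B (the rewrite author's own statement) =====
-- stated objective: simpler
-- what changed: Replaced the shrinking while-loop with a closed-form count 1 + max(0, (min(5,n) - max(0,n-5)) // 2).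
import Mathlib
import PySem

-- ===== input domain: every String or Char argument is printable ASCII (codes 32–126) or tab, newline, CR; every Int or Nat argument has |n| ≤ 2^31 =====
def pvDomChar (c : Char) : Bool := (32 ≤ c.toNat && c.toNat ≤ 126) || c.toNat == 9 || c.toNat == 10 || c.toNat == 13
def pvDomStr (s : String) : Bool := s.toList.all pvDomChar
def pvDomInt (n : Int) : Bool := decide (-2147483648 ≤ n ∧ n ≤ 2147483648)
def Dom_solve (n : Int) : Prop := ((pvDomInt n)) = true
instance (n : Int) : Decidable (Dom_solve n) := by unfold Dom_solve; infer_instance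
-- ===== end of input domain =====

-- B replaces A's shrinking while-loop with a closed-form count (objective: simpler).

-- ===== PORT A =====
-- the while-loop of A: state (a, n, total), loop while a + 1 < n
def solveLoop (a n total : Int) : Int :=
  if a + 1 < n then solveLoop (a + 1) (n - 1) (total + 1) else total
termination_by (n - a).toNat
decreasing_by omega

def solve (n : Int) : Int :=
  let a := max 0 (n - 5)
  let n' := min 5 n
  solveLoop a n' 1

-- ===== PORT B =====
def solve_alt (n : Int) : Int :=
  let g := min 5 n - max 0 (n - 5)
  1 + max 0 (PySem.Int.floordiv g 2)

-- ===== PRECONDITION & SPEC =====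
def Spec_solve (n : Int) (out : Int) : Prop := out = solve_alt n
instance (n : Int) (out : Int) : Decidable (Spec_solve n out) := by unfold Spec_solve; infer_instance

-- ===== CLAIM (what is proved, stated in full; the proofs are below) =====
def Claim_equal_solve : Prop := ∀ (n : Int), Dom_solve n → Spec_solve n (solve n)

-- ===== LEMMAS AND PROOFS =====

theorem solveLoop_closed (a n total : Int) :
    solveLoop a n total = total + max 0 (PySem.Int.floordiv (n - a) 2) := by
  have hfd : ∀ x : Int, PySem.Int.floordiv x 2 = x / 2 :=
    fun x => PySem.Int.floordiv_eq_ediv_of_pos (by norm_num)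
  fun_induction solveLoop a n total with
  | case1 a n total h ih =>
    rw [ih, hfd, hfd]
    omega
  | case2 a n total h =>
    simp only [hfd]
    omega

-- ===== VERDICT (by name: the statement is the Claim_ definition above) =====
theorem solve_spec : Claim_equal_solve := by
  intro n _
  unfold Spec_solve solve solve_alt
  rw [solveLoop_closed]
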